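-- pv_equiv track=rewrite | github.com/AfsanaBrishty/MyCodeSolves | Fifo_Optimal_Page_replacement.py | Optimal_frame
-- ===== SOURCE A (Python) =====
-- def Optimal_frame(reference_indx, f_List, Ref_str):
--     targetF_List = []
--
--     highest_Priority = 1000000
--     for i in range(len(f_List)):
--
--         try:
--             indx = Ref_str.index(f_List[i], reference_indx)
--             targetF_List.append((indx, i))
--         except ValueError:
--             indx = highest_Priority
--             targetF_List.append((indx, i))
--
--     targetF_List.sort(key=lambda x: x[0], reverse=True)
--     return targetF_List[0][1]
-- ===== SOURCE B (Python) =====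
-- def Optimal_frame(reference_indx, f_List, Ref_str):
--     # single pass: track frame with farthest next use; strict '>' keeps the
--     # smallest index among ties (same tie-break as A's stable reverse sort)
--     best_indx, best_i = -1, -1
--     for i, f in enumerate(f_List):
--         try:
--             indx = Ref_str.index(f, reference_indx)
--         except ValueError:
--             indx = 1000000
--         if indx > best_indx:
--             best_indx, best_i = indx, i
--     return best_i
-- ===== Notes on version B (the rewrite author's own statement) =====
-- stated objective: simpler
-- what changed: Replaces building a tuple list and stable reverse-sorting it with a single pass over the frames that tracks the current farthest next-use frame via a strict > comparison (same tie-break), so no intermediate list and no sort.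
-- outside the precondition, e.g. on Optimal_frame(0, [], [1, 2]): A raises IndexError, B returns -1
import Mathlib
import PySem

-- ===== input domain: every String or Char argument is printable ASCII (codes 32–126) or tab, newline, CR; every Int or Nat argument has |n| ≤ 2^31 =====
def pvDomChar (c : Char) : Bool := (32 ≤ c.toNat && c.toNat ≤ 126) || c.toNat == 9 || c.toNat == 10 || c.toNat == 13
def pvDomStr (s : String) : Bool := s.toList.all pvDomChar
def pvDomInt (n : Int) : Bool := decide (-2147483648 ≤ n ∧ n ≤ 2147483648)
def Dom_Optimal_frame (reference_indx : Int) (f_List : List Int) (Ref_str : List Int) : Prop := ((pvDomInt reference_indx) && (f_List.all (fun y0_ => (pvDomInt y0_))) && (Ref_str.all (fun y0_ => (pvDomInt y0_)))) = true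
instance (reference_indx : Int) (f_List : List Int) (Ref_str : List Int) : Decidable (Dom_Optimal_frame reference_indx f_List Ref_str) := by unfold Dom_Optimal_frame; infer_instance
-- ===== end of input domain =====

-- B replaces A's build-tuple-list-then-stable-reverse-sort with a single pass tracking the
-- farthest next-use frame (strict '>' keeps A's tie-break); objective: simpler, no sort.


-- ===== PORT A =====
-- hand port of Python's list.index(v, start) (both programs call it): a negative start is
-- taken from the end and clamped at 0; none = ValueError. Exact on all Int starts.
def pyStartClamp (n : Nat) (start : Int) : Nat :=
  if start < 0 then (start + n).toNat else start.toNat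
def pyIndexFrom (xs : List Int) (v : Int) (start : Int) : Option Int :=
  match PySem.List.index? (xs.drop (pyStartClamp xs.length start)) v with
  | some k => some ((pyStartClamp xs.length start : Int) + k)
  | none => none

def Optimal_frame (reference_indx : Int) (f_List : List Int) (Ref_str : List Int) : Int :=
  let targetF_List : List (Int × Int) :=
    (List.range f_List.length).foldl
      (fun acc i =>
        match pyIndexFrom Ref_str (f_List.getD i 0) reference_indx with
        | some indx => acc ++ [(indx, (i : Int))]
        | none => acc ++ [((1000000 : Int), (i : Int))])
      []
  match PySem.List.sorted targetF_List (fun x => x.1) true with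
  | [] => 0  -- unreachable under Pre_: Python raises IndexError on targetF_List[0] here
  | p :: _ => p.2

-- ===== PORT B =====
def Optimal_frame_alt (reference_indx : Int) (f_List : List Int) (Ref_str : List Int) : Int :=
  ((PySem.List.enumerate f_List).foldl
    (fun (b : Int × Int) (p : Int × Int) =>
      let indx := (pyIndexFrom Ref_str p.2 reference_indx).getD 1000000
      if indx > b.1 then (indx, p.1) else b)
    (-1, -1)).2

-- ===== PRECONDITION & SPEC =====
-- Pre_ excludes only the empty frame list, on which A raises IndexError (targetF_List[0]).
def Pre_Optimal_frame (reference_indx : Int) (f_List : List Int) (Ref_str : List Int) : Prop :=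
  f_List ≠ []
instance (reference_indx : Int) (f_List : List Int) (Ref_str : List Int) : Decidable (Pre_Optimal_frame reference_indx f_List Ref_str) := by unfold Pre_Optimal_frame; infer_instance

def pvWitness_Optimal_frame : Int × List Int × List Int := (0, [1, 2], [2, 3, 1])

def Spec_Optimal_frame (reference_indx : Int) (f_List : List Int) (Ref_str : List Int) (out : Int) : Prop := out = Optimal_frame_alt reference_indx f_List Ref_str
instance (reference_indx : Int) (f_List : List Int) (Ref_str : List Int) (out : Int) : Decidable (Spec_Optimal_frame reference_indx f_List Ref_str out) := by unfold Spec_Optimal_frame; infer_instance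

-- ===== CLAIM (what is proved, stated in full; the proofs are below) =====
def Claim_equal_Optimal_frame : Prop := ∀ (reference_indx : Int) (f_List : List Int) (Ref_str : List Int), Dom_Optimal_frame reference_indx f_List Ref_str → Pre_Optimal_frame reference_indx f_List Ref_str → Spec_Optimal_frame reference_indx f_List Ref_str (Optimal_frame reference_indx f_List Ref_str)

-- ===== LEMMAS AND PROOFS =====

-- the per-frame key: next-use position, ValueError → 1000000
def pvKey (reference_indx : Int) (Ref_str : List Int) (f : Int) : Int :=
  (pyIndexFrom Ref_str f reference_indx).getD 1000000

theorem pvKey_nonneg (reference_indx : Int) (Ref_str : List Int) (f : Int) :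
    0 ≤ pvKey reference_indx Ref_str f := by
  unfold pvKey pyIndexFrom
  cases h : PySem.List.index? (Ref_str.drop (pyStartClamp Ref_str.length reference_indx)) f with
  | none => simp
  | some k => simp only [Option.getD_some]; positivity

theorem enumerate_eq (xs : List Int) :
    ∀ s : Int, PySem.List.enumerate xs s =
      (List.range xs.length).map (fun (i : Nat) => ((s + (i : Int)), xs.getD i 0)) := by
  induction xs with
  | nil => intro s; rfl
  | cons x t ih =>
      intro s
      simp only [PySem.List.enumerate, List.length_cons, List.range_succ_eq_map,
        List.map_cons, List.map_map, List.cons.injEq]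
      constructor
      · simp
      · rw [ih (s + 1)]
        apply List.map_congr_left
        intro i _
        simp only [Function.comp_apply, Prod.mk.injEq, List.getD_cons_succ,
          Nat.succ_eq_add_one]
        exact ⟨by push_cast; ring, trivial⟩

-- head of repeated stable insertion (reverse order) = strict-max fold
theorem head_foldl_insertBy (L : List (Int × Int)) :
    ∀ (y : Int × Int) (ys : List (Int × Int)),
      ∃ t, L.foldl (fun acc x => PySem.List.insertBy (fun a b => decide (b.1 < a.1)) x acc) (y :: ys)
        = (L.foldl (fun b p => if b.1 < p.1 then p else b) y) :: t := by
  induction L with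
  | nil => intro y ys; exact ⟨ys, rfl⟩
  | cons p L ih =>
      intro y ys
      by_cases h : y.1 < p.1
      · have : PySem.List.insertBy (fun a b => decide (b.1 < a.1)) p (y :: ys) = p :: y :: ys := by
          simp [PySem.List.insertBy, h]
        simp only [List.foldl_cons, this, if_pos h]
        exact ih p (y :: ys)
      · have : PySem.List.insertBy (fun a b => decide (b.1 < a.1)) p (y :: ys)
            = y :: PySem.List.insertBy (fun a b => decide (b.1 < a.1)) p ys := by
          simp [PySem.List.insertBy, h]
        simp only [List.foldl_cons, this, if_neg h]
        exact ih y _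

theorem Optimal_frame_spec : Claim_equal_Optimal_frame := by
  intro reference_indx f_List Ref_str _ hpre
  unfold Spec_Optimal_frame Optimal_frame Optimal_frame_alt
  -- rewrite both sides as folds over the same list M of (key, index) pairs
  have hA : (List.range f_List.length).foldl
      (fun acc i =>
        match pyIndexFrom Ref_str (f_List.getD i 0) reference_indx with
        | some indx => acc ++ [(indx, (i : Int))]
        | none => acc ++ [((1000000 : Int), (i : Int))])
      []
      = (List.range f_List.length).map
          (fun i => (pvKey reference_indx Ref_str (f_List.getD i 0), (i : Int))) := by
    have hbody : ∀ (acc : List (Int × Int)) (i : Nat),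
        (match pyIndexFrom Ref_str (f_List.getD i 0) reference_indx with
         | some indx => acc ++ [(indx, (i : Int))]
         | none => acc ++ [((1000000 : Int), (i : Int))])
        = acc ++ [(pvKey reference_indx Ref_str (f_List.getD i 0), (i : Int))] := by
      intro acc i
      unfold pvKey
      cases h : pyIndexFrom Ref_str (f_List.getD i 0) reference_indx <;> simp [h]
    calc (List.range f_List.length).foldl
          (fun acc i =>
            match pyIndexFrom Ref_str (f_List.getD i 0) reference_indx with
            | some indx => acc ++ [(indx, (i : Int))]
            | none => acc ++ [((1000000 : Int), (i : Int))]) []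
        = (List.range f_List.length).foldl
            (fun acc i => acc ++ [(pvKey reference_indx Ref_str (f_List.getD i 0), (i : Int))]) [] := by
          exact PySem.List.foldl_congr_mem _ _ _ _ (fun acc i _ => hbody acc i)
      _ = _ := by
          rw [PySem.List.foldl_append_singleton_eq_map]; rfl
  have hB : (PySem.List.enumerate f_List).foldl
      (fun (b : Int × Int) (p : Int × Int) =>
        let indx := (pyIndexFrom Ref_str p.2 reference_indx).getD 1000000
        if indx > b.1 then (indx, p.1) else b) (-1, -1)
      = ((List.range f_List.length).map
          (fun i => (pvKey reference_indx Ref_str (f_List.getD i 0), (i : Int)))).foldl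
          (fun b p => if b.1 < p.1 then p else b) (-1, -1) := by
    rw [enumerate_eq f_List 0, List.foldl_map, List.foldl_map]
    apply PySem.List.foldl_congr_mem
    intro b i _
    simp only [zero_add, gt_iff_lt, pvKey]
  rw [hA, hB]
  -- nonempty: peel the first pair
  obtain ⟨x, t, rfl⟩ : ∃ x t, f_List = x :: t := by
    cases f_List with
    | nil => exact absurd rfl hpre
    | cons x t => exact ⟨x, t, rfl⟩
  set g : Nat → Int × Int := fun i => (pvKey reference_indx Ref_str ((x :: t).getD i 0), (i : Int)) with hg
  have hM : (List.range (x :: t).length).map g = g 0 :: (List.range t.length).map (fun i => g (i + 1)) := by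
    simp [List.range_succ_eq_map, List.map_map, Function.comp]
  rw [hM]
  -- A side: sorted … reverse=true is a foldl of insertBy; first insert into [] gives [g 0]
  simp only [PySem.List.sorted, if_true, List.foldl_cons]
  have hins0 : PySem.List.insertBy (fun (a b : Int × Int) => decide (b.1 < a.1)) (g 0) ([] : List (Int × Int)) = [g 0] := by
    rfl
  rw [hins0]
  obtain ⟨tl, htl⟩ := head_foldl_insertBy ((List.range t.length).map (fun i => g (i + 1))) (g 0) []
  rw [htl]
  -- B side: the first step replaces the (-1,-1) seed, since keys are ≥ 0
  have hstep0 : (if ((-1, -1) : Int × Int).1 < (g 0).1 then g 0 else (-1, -1)) = g 0 := by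
    have := pvKey_nonneg reference_indx Ref_str ((x :: t).getD 0 0)
    simp only [hg]
    rw [if_pos]
    omega
  simp only [hstep0]
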